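-- pv_equiv track=rewrite | github.com/TheCaptaine/Bric-a-Brac | serie de petit exo.py | AutoNombre
-- ===== SOURCE A (Python) =====
-- def AutoNombre(n):
-- 	for k in range(n):
-- 		a = k
-- 		for h in range(len(str(k))):
-- 			a += int(str(k)[h])
-- 		if a == n:
-- 			return "True : {}".format(k)
-- 	return "False"
-- ===== SOURCE B (Python) =====
-- def AutoNombre(n):
-- 	# Only k >= n - 9*len(str(n)) can satisfy k + digitsum(k) == n, since
-- 	# digitsum(k) <= 9*len(str(k)) <= 9*len(str(n)) for 0 <= k < n.
-- 	start = n - 9 * len(str(n))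
-- 	if start < 0:
-- 		start = 0
-- 	for k in range(start, n):
-- 		a = k
-- 		m = k
-- 		while m > 0:
-- 			a += m % 10
-- 			m //= 10
-- 		if a == n:
-- 			return "True : {}".format(k)
-- 	return "False"
-- ===== Notes on version B (the rewrite author's own statement) =====
-- stated objective: faster
-- what changed: B scans only the window [n - 9*len(str(n)), n) instead of all of [0, n), and computes the digit sum arithmetically (mod/div 10) instead of via string conversion and per-character int().
import Mathlib
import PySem

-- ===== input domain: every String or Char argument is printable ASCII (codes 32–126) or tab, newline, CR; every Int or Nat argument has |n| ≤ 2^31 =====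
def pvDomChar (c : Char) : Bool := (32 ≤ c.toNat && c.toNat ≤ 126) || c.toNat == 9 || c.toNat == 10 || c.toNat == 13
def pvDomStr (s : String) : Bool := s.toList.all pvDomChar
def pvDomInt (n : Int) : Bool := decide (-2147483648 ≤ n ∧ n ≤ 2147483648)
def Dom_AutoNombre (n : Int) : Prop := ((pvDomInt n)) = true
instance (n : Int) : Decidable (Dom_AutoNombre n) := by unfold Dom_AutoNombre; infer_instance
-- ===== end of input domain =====

-- B scans only the window [n - 9*len(str(n)), n) instead of all of [0, n) and computes the
-- digit sum arithmetically (mod/div 10) instead of through str(); objective: faster.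

-- ===== PORT A =====
-- int(str(k)[h]): index, then int() of the one-char string; on every input the loop reaches
-- (k ≥ 0, h < len) both Option branches are some, so the getD 0 default is dead code.
def pvDigitAt (s : String) (h : Int) : Int :=
  ((PySem.Str.pyGet? s h).bind (fun c => PySem.Int.ofChars? [c])).getD 0

-- a = k; for h in range(len(str(k))): a += int(str(k)[h])
def pvAInner (k : Int) : Int :=
  (PySem.List.pyRange 0 (PySem.Str.len (PySem.Int.toStr k)) 1).foldl
    (fun a h => a + pvDigitAt (PySem.Int.toStr k) h) k

-- for k in range(n): … early return "True : {}".format(k) … ; return "False"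
def pvALoop (n : Int) : List Int → String
  | [] => "False"
  | k :: ks => if pvAInner k = n then "True : " ++ PySem.Int.toStr k else pvALoop n ks

def AutoNombre (n : Int) : String := pvALoop n (PySem.List.pyRange 0 n 1)

-- ===== PORT B =====
-- while m > 0: a += m % 10; m //= 10
def pvDsLoop (a m : Int) : Int :=
  if 0 < m then pvDsLoop (a + PySem.Int.mod m 10) (PySem.Int.floordiv m 10) else a
termination_by m.toNat
decreasing_by
  rw [PySem.Int.floordiv_eq_ediv_of_pos (by norm_num)]
  omega

-- for k in range(start, n): a = k; m = k; while …; early return; return "False"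
def pvBLoop (n : Int) : List Int → String
  | [] => "False"
  | k :: ks => if pvDsLoop k k = n then "True : " ++ PySem.Int.toStr k else pvBLoop n ks

def AutoNombre_alt (n : Int) : String :=
  let start0 := n - 9 * PySem.Str.len (PySem.Int.toStr n)
  let start := if start0 < 0 then 0 else start0
  pvBLoop n (PySem.List.pyRange start n 1)

-- ===== PRECONDITION & SPEC =====
def Spec_AutoNombre (n : Int) (out : String) : Prop := out = AutoNombre_alt n
instance (n : Int) (out : String) : Decidable (Spec_AutoNombre n out) := by unfold Spec_AutoNombre; infer_instance

-- ===== CLAIM (what is proved, stated in full; the proofs are below) =====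
def Claim_equal_AutoNombre : Prop := ∀ (n : Int), Dom_AutoNombre n → Spec_AutoNombre n (AutoNombre n)

-- ===== LEMMAS AND PROOFS =====

-- Nat.toDigits is the decimal digit characters, most significant first
lemma pv_toDigitsCore_eq (f : Nat) : ∀ (m : Nat) (acc : List Char), 0 < m → m < f →
    Nat.toDigitsCore 10 f m acc = ((Nat.digits 10 m).map Nat.digitChar).reverse ++ acc := by
  induction f with
  | zero => intro m acc hm hf; omega
  | succ f ih =>
    intro m acc hm hf
    rw [Nat.toDigitsCore]
    by_cases h : m / 10 = 0
    · have hm10 : m < 10 := by omega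
      rw [if_pos h, Nat.digits_def' (by norm_num : (1:Nat) < 10) hm, h]
      simp [Nat.mod_eq_of_lt hm10]
    · have hlt : m / 10 < m := Nat.div_lt_self hm (by norm_num)
      rw [if_neg h, ih (m / 10) _ (Nat.pos_of_ne_zero h) (by omega),
        Nat.digits_def' (by norm_num : (1:Nat) < 10) hm]
      simp

lemma pv_toDigits_eq (m : Nat) (hm : 0 < m) :
    Nat.toDigits 10 m = ((Nat.digits 10 m).map Nat.digitChar).reverse := by
  rw [Nat.toDigits, pv_toDigitsCore_eq (m + 1) m [] hm (by omega), List.append_nil]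

lemma pv_ofChars_digitChar (d : Nat) (hd : d < 10) :
    (PySem.Int.ofChars? [Nat.digitChar d]).getD 0 = (d : Int) := by
  interval_cases d <;> decide

lemma pv_foldl_add (v : Char → Int) (cs : List Char) : ∀ init : Int,
    cs.foldl (fun a c => a + v c) init = init + (cs.map v).sum := by
  induction cs with
  | nil => simp
  | cons c cs ih => intro init; simp [ih]; ring

-- A's inner index loop is a fold over the characters of str(k)
lemma pv_inner_eq_fold_chars (s : String) (k : Int) :
    (PySem.List.pyRange 0 (PySem.Str.len s) 1).foldl (fun a h => a + pvDigitAt s h) k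
      = s.toList.foldl (fun a c => a + (PySem.Int.ofChars? [c]).getD 0) k := by
  have hlen : PySem.Str.len s = ((s.toList.length : Int)) := by simp
  rw [hlen,
    PySem.List.foldl_congr_mem (g := fun a h => a + (PySem.Int.ofChars? [PySem.List.pyGetD s.toList h '0']).getD 0)]
  · exact PySem.List.foldl_pyRange_zero_pyGetD' s.toList '0'
      (fun a c => a + (PySem.Int.ofChars? [c]).getD 0) k
  · intro a h hmem
    rw [PySem.List.mem_pyRange_one] at hmem
    obtain ⟨h0, hlt⟩ := hmem
    have hN : h.toNat < s.toList.length := by omega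
    rw [pvDigitAt, show PySem.Str.pyGet? s h = PySem.List.pyGet? s.toList h from by simp,
      PySem.List.pyGet?_of_nonneg s.toList h0, List.getElem?_eq_getElem hN, Option.bind_some,
      PySem.List.pyGetD_eq_getElem s.toList '0' h0 hlt]

lemma pvAInner_eq (m : Nat) :
    pvAInner (m : Int) = (m : Int) + ((Nat.digits 10 m).sum : Int) := by
  rw [pvAInner, pv_inner_eq_fold_chars, PySem.Int.toList_toStr]
  have hchars : PySem.Int.toChars (m : Int) = Nat.toDigits 10 m := by
    simp [PySem.Int.toChars]
  rw [hchars, pv_foldl_add]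
  rcases Nat.eq_zero_or_pos m with rfl | hm
  · decide
  · rw [pv_toDigits_eq m hm, List.map_reverse, List.sum_reverse, List.map_map]
    have : (Nat.digits 10 m).map ((fun c => (PySem.Int.ofChars? [c]).getD 0) ∘ Nat.digitChar)
        = (Nat.digits 10 m).map (Nat.cast : Nat → Int) := by
      apply List.map_congr_left
      intro d hd
      exact pv_ofChars_digitChar d (Nat.digits_lt_base (by norm_num) hd)
    rw [this, Nat.cast_list_sum]

lemma pvDsLoop_eq (m : Nat) : ∀ a : Int,
    pvDsLoop a (m : Int) = a + ((Nat.digits 10 m).sum : Int) := by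
  induction m using Nat.strong_induction_on with
  | _ m ih =>
    intro a
    rw [pvDsLoop]
    rcases Nat.eq_zero_or_pos m with rfl | hm
    · simp
    · rw [if_pos (by exact_mod_cast hm)]
      have hmod : PySem.Int.mod (m : Int) 10 = ((m % 10 : Nat) : Int) := by
        exact_mod_cast PySem.Int.mod_natCast m 10
      have hdiv : PySem.Int.floordiv (m : Int) 10 = ((m / 10 : Nat) : Int) := by
        exact_mod_cast PySem.Int.floordiv_natCast m 10
      rw [hmod, hdiv, ih (m / 10) (Nat.div_lt_self hm (by norm_num)),
        Nat.digits_def' (by norm_num : (1:Nat) < 10) hm, List.sum_cons]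
      push_cast
      ring

-- the digit sum is at most 9 per digit
lemma pv_ds_le (k : Nat) : (Nat.digits 10 k).sum ≤ 9 * (Nat.digits 10 k).length := by
  have := List.sum_le_card_nsmul (Nat.digits 10 k) 9
    (fun x hx => Nat.le_of_lt_succ (Nat.digits_lt_base (by norm_num) hx))
  rw [smul_eq_mul] at this
  omega

lemma pv_strlen_pos (n : Int) (hn : 0 < n) :
    PySem.Str.len (PySem.Int.toStr n) = ((Nat.digits 10 n.toNat).length : Int) := by
  have h1 : (PySem.Int.toStr n).toList = PySem.Int.toChars n := PySem.Int.toList_toStr n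
  have h2 : PySem.Int.toChars n = Nat.toDigits 10 n.toNat := by
    simp [PySem.Int.toChars, not_lt.mpr (le_of_lt hn)]
  have h3 : Nat.toDigits 10 n.toNat
      = ((Nat.digits 10 n.toNat).map Nat.digitChar).reverse :=
    pv_toDigits_eq n.toNat (by omega)
  simp [h1, h2, h3]

-- no k below the window can satisfy k + digitsum(k) = n
lemma pv_window (n : Int) (hn : 0 < n) (m : Nat) (hm : (m : Int) < n)
    (heq : (m : Int) + ((Nat.digits 10 m).sum : Int) = n) :
    n - 9 * PySem.Str.len (PySem.Int.toStr n) ≤ (m : Int) := by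
  rw [pv_strlen_pos n hn]
  have h1 : (Nat.digits 10 m).sum ≤ 9 * (Nat.digits 10 m).length := pv_ds_le m
  have h2 : (Nat.digits 10 m).length ≤ (Nat.digits 10 n.toNat).length :=
    Nat.le_length_digits_le 10 m n.toNat (by omega)
  have := heq
  push_cast at this ⊢
  omega

lemma pvALoop_drop (n : Int) (xs ys : List Int) (h : ∀ k ∈ xs, pvAInner k ≠ n) :
    pvALoop n (xs ++ ys) = pvALoop n ys := by
  induction xs with
  | nil => simp
  | cons x xs ih =>
    rw [List.cons_append, pvALoop, if_neg (h x List.mem_cons_self)]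
    exact ih (fun k hk => h k (List.mem_cons_of_mem x hk))

lemma pv_loops_eq (n : Int) (xs : List Int) (h : ∀ k ∈ xs, 0 ≤ k) :
    pvALoop n xs = pvBLoop n xs := by
  induction xs with
  | nil => rfl
  | cons x xs ih =>
    have hx : 0 ≤ x := h x List.mem_cons_self
    have hcond : pvAInner x = pvDsLoop x x := by
      have hxx : x = ((x.toNat : Nat) : Int) := by omega
      rw [hxx, pvAInner_eq, pvDsLoop_eq]
    rw [pvALoop, pvBLoop, hcond]
    split
    · rfl
    · exact ih (fun k hk => h k (List.mem_cons_of_mem x hk))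

-- ===== VERDICT (by name: the statement is the Claim_ definition above) =====
theorem AutoNombre_spec : Claim_equal_AutoNombre := by
  intro n _
  show AutoNombre n = AutoNombre_alt n
  rw [AutoNombre, AutoNombre_alt]
  have hL : 0 ≤ PySem.Str.len (PySem.Int.toStr n) := by simp
  set s0 := n - 9 * PySem.Str.len (PySem.Int.toStr n) with hs0
  set st := if s0 < 0 then 0 else s0 with hst
  have hst0 : 0 ≤ st := by rw [hst]; split <;> omega
  have hs0st : s0 ≤ st := by rw [hst]; split <;> omega
  by_cases hn : n ≤ 0
  · rw [PySem.List.pyRange_one_eq_nil hn, PySem.List.pyRange_one_eq_nil (by omega)]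
    rfl
  · push_neg at hn
    have hstn : st ≤ n := by rw [hst]; split <;> omega
    rw [PySem.List.pyRange_one_append 0 st n hst0 hstn,
      pvALoop_drop n _ _ ?_, pv_loops_eq n _ ?_]
    · intro k hk
      rw [PySem.List.mem_pyRange_one] at hk
      omega
    · intro k hk heq
      rw [PySem.List.mem_pyRange_one] at hk
      obtain ⟨hk0, hkst⟩ := hk
      have hkeq : k = ((k.toNat : Nat) : Int) := by omega
      rw [hkeq, pvAInner_eq] at heq
      have := pv_window n hn k.toNat (by omega) heq
      omega
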